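-- pv_equiv track=rewrite | github.com/DigitalWatergun/chess | engine/valid_moves.py | check_king_moves
-- ===== SOURCE A (Python) =====
-- def check_king_moves(selected_piece_pos, dest_piece_pos):
--     start_row, start_col = selected_piece_pos[0], selected_piece_pos[1]
--     end_row, end_col = dest_piece_pos[0], dest_piece_pos[1]
--
--     directions = [[0, 1], [0, -1], [1, 0], [-1, 0], [1, 1], [1, -1], [-1, 1], [-1, -1]]
--
--     for dr, dc in directions:
--         if start_row + dr == end_row and start_col + dc == end_col:
--             return True
--
--     return False
-- ===== SOURCE B (Python) =====
-- def check_king_moves(selected_piece_pos, dest_piece_pos):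
--     # Closed-form: a king move is a nonzero step of at most one square in each axis.
--     dr = dest_piece_pos[0] - selected_piece_pos[0]
--     dc = dest_piece_pos[1] - selected_piece_pos[1]
--     return (dr, dc) != (0, 0) and dr in (-1, 0, 1) and dc in (-1, 0, 1)
-- ===== Notes on version B (the rewrite author's own statement) =====
-- stated objective: simpler
-- what changed: Replaced the 8-direction scan with a closed-form delta check: compute dr, dc and test (dr,dc) != (0,0) with each delta in {-1,0,1}.
import Mathlib
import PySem

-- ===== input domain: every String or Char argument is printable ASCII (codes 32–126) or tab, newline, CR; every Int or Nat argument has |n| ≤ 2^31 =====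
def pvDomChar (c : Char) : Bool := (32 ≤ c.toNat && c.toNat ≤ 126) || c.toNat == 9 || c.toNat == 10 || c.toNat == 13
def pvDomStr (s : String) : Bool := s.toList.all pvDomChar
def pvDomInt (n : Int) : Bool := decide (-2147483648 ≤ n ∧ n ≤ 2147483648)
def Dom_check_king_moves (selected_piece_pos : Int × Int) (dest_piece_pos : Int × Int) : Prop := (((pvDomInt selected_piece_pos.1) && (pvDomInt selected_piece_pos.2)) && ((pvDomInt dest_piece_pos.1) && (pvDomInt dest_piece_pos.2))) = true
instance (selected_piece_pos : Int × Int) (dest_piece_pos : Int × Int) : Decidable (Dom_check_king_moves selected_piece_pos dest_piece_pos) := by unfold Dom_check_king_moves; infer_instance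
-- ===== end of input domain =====

-- ===== PORT A =====
-- Header: B replaces A's 8-direction loop with a closed-form delta check (simpler).
def check_king_moves (selected_piece_pos : Int × Int) (dest_piece_pos : Int × Int) : Bool :=
  let start_row := selected_piece_pos.1
  let start_col := selected_piece_pos.2
  let end_row := dest_piece_pos.1
  let end_col := dest_piece_pos.2
  let directions : List (Int × Int) :=
    [(0, 1), (0, -1), (1, 0), (-1, 0), (1, 1), (1, -1), (-1, 1), (-1, -1)]
  directions.any (fun p => start_row + p.1 == end_row && start_col + p.2 == end_col)

-- ===== PORT B =====
def check_king_moves_alt (selected_piece_pos : Int × Int) (dest_piece_pos : Int × Int) : Bool :=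
  let dr := dest_piece_pos.1 - selected_piece_pos.1
  let dc := dest_piece_pos.2 - selected_piece_pos.2
  !(dr == 0 && dc == 0) && (dr == -1 || dr == 0 || dr == 1) && (dc == -1 || dc == 0 || dc == 1)

-- ===== PRECONDITION & SPEC =====
def Spec_check_king_moves (selected_piece_pos : Int × Int) (dest_piece_pos : Int × Int) (out : Bool) : Prop := out = check_king_moves_alt selected_piece_pos dest_piece_pos
instance (selected_piece_pos : Int × Int) (dest_piece_pos : Int × Int) (out : Bool) : Decidable (Spec_check_king_moves selected_piece_pos dest_piece_pos out) := by unfold Spec_check_king_moves; infer_instance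

-- ===== CLAIM (what is proved, stated in full; the proofs are below) =====
def Claim_equal_check_king_moves : Prop := ∀ (selected_piece_pos : Int × Int) (dest_piece_pos : Int × Int), Dom_check_king_moves selected_piece_pos dest_piece_pos → Spec_check_king_moves selected_piece_pos dest_piece_pos (check_king_moves selected_piece_pos dest_piece_pos)

-- ===== LEMMAS AND PROOFS =====

-- ===== VERDICT (by name: the statement is the Claim_ definition above) =====
theorem check_king_moves_spec : Claim_equal_check_king_moves := by
  intro s d _
  obtain ⟨a, b⟩ := s
  obtain ⟨c, e⟩ := d
  unfold Spec_check_king_moves check_king_moves check_king_moves_alt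
  rw [Bool.eq_iff_iff]
  simp only [List.any_cons, List.any_nil, Bool.or_eq_true, Bool.and_eq_true, Bool.not_eq_true',
    beq_iff_eq, Bool.and_eq_false_iff, beq_eq_false_iff_ne, ne_eq, Bool.or_false]
  constructor <;> intro h <;> omega
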